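-- pv_equiv track=rewrite | github.com/dexforint/ContextiPY | solutions/cto/contextipy/scanner/dependency_installer.py | parse_requirements_from_docstring
-- ===== SOURCE A (Python) =====
-- def parse_requirements_from_docstring(docstring: str | None) -> tuple[str, ...]:
--     """Extract requirements declared in a script docstring.
--
--     The parser supports two formats:
--
--     1. A dedicated section introduced by ``Requirements:`` followed by one
--        requirement per line (optionally indented or listed with ``-``/``*``).
--     2. A fenced Markdown block labelled ``requirements``.
--
--     Requirement lines may include inline comments (``# comment``), which are
--     ignored. Duplicate requirements are removed while preserving order.
--     """
--
--     if not docstring: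
--         return ()
--
--     lines = docstring.splitlines()
--     requirements: list[str] = []
--     idx = 0
--     total = len(lines)
--
--     while idx < total:
--         line = lines[idx]
--         stripped = line.strip()
--         lower = stripped.lower()
--
--         # Fenced code block: ```requirements
--         if stripped.startswith("```"):
--             fence_lang = stripped[3:].strip().lower()
--             idx += 1
--             in_requirements_block = fence_lang.startswith("requirements")
--             while idx < total:
--                 block_line = lines[idx].strip()
--                 if block_line.startswith("```"):
--                     idx += 1
--                     break
--                 if in_requirements_block:
--                     requirement = _normalise_requirement_line(lines[idx])
--                     if requirement:
--                         requirements.append(requirement)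
--                 idx += 1
--             continue
--
--         if lower.startswith("requirements:"):
--             tail = line.split(":", 1)[1].strip()
--             if tail:
--                 requirement = _normalise_requirement_line(tail)
--                 if requirement:
--                     requirements.append(requirement)
--             idx += 1
--             collected, idx = _collect_requirement_block(lines, idx)
--             requirements.extend(collected)
--             continue
--
--         idx += 1
--
--     # De-duplicate while preserving order
--     seen = dict.fromkeys(requirements)
--     return tuple(seen)
--
-- def _collect_requirement_block(lines: list[str], start: int) -> tuple[list[str], int]:
--     collected: list[str] = []
--     idx = start
--     total = len(lines)
--
--     while idx < total:
--         raw_line = lines[idx]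
--         stripped = raw_line.strip()
--         if not stripped:
--             idx += 1
--             break
--         if not raw_line.startswith((" ", "\t")) and not stripped.startswith(("-", "*")):
--             # Stop if the next section starts (e.g. "Notes:")
--             if ":" in stripped:
--                 break
--         requirement = _normalise_requirement_line(raw_line)
--         if not requirement:
--             idx += 1
--             continue
--         collected.append(requirement)
--         idx += 1
--
--     return collected, idx
--
-- def _normalise_requirement_line(line: str) -> str:
--     stripped = line.strip()
--     if not stripped:
--         return ""
--     if stripped.startswith(("-", "*")):
--         stripped = stripped[1:].strip()
--     if stripped.startswith("#"):
--         return ""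
--     if " #" in stripped:
--         stripped = stripped.split(" #", 1)[0].rstrip()
--     return stripped
-- ===== SOURCE B (Python) =====
-- def parse_requirements_from_docstring(docstring):
--     """Single-pass state machine over the lines (NORMAL / fence / block states)."""
--     if not docstring:
--         return ()
--     NORMAL, FENCE_REQ, FENCE_OTHER, BLOCK = 0, 1, 2, 3
--     lines = docstring.splitlines()
--     reqs = []
--     state = NORMAL
--     i = 0
--     while i < len(lines):
--         line = lines[i]
--         stripped = line.strip()
--         if state == FENCE_REQ or state == FENCE_OTHER:
--             if stripped.startswith("```"):
--                 state = NORMAL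
--             elif state == FENCE_REQ:
--                 r = _normalise(line)
--                 if r:
--                     reqs.append(r)
--             i += 1
--         elif state == BLOCK:
--             if not stripped:
--                 state = NORMAL
--                 i += 1
--             elif (not line.startswith((" ", "\t"))
--                   and not stripped.startswith(("-", "*"))
--                   and ":" in stripped):
--                 state = NORMAL  # section header: leave block, reprocess this line
--             else:
--                 r = _normalise(line)
--                 if r:
--                     reqs.append(r)
--                 i += 1
--         else:  # NORMAL
--             if stripped.startswith("```"):
--                 lang = stripped[3:].strip().lower()
--                 state = FENCE_REQ if lang.startswith("requirements") else FENCE_OTHER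
--             elif stripped.lower().startswith("requirements:"):
--                 tail = line.split(":", 1)[1].strip()
--                 if tail:
--                     r = _normalise(tail)
--                     if r:
--                         reqs.append(r)
--                 state = BLOCK
--             i += 1
--     out = []
--     seen = set()
--     for r in reqs:
--         if r not in seen:
--             seen.add(r)
--             out.append(r)
--     return tuple(out)
--
-- def _normalise(line):
--     stripped = line.strip()
--     if not stripped:
--         return ""
--     if stripped.startswith(("-", "*")):
--         stripped = stripped[1:].strip()
--     if stripped.startswith("#"):
--         return ""
--     if " #" in stripped:
--         stripped = stripped.split(" #", 1)[0].rstrip()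
--     return stripped
-- ===== Notes on version B (the rewrite author's own statement) =====
-- stated objective: alternative
-- what changed: Replaced the outer index loop with nested inner loops and the separate _collect_requirement_block helper by one single-pass explicit state machine (NORMAL / FENCE_REQ / FENCE_OTHER / BLOCK) over the lines, with dedup via an explicit seen-set loop instead of dict.fromkeys.
import Mathlib
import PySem

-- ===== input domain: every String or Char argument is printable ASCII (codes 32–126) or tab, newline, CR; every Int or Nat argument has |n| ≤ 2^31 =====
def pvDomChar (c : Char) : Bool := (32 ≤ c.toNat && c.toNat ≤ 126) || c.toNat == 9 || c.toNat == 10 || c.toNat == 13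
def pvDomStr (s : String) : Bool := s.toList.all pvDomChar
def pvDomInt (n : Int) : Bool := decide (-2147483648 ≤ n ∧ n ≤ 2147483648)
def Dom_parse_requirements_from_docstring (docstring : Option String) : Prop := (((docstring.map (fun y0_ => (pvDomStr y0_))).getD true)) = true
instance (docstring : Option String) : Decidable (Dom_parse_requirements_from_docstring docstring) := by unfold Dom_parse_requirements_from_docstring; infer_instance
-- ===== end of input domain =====

-- B replaces A's outer index loop + inner loops/helper by one explicit state machine over the lines (alternative decomposition, same cost).


-- ===== PORT A =====

-- _normalise_requirement_line (shared verbatim by both Python versions)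
def normReq (line : String) : String :=
  let stripped := PySem.Str.strip line
  if stripped = "" then ""
  else
    let stripped :=
      if PySem.Str.startswith stripped "-" || PySem.Str.startswith stripped "*" then
        PySem.Str.strip (PySem.Str.slice stripped (some 1) none)
      else stripped
    if PySem.Str.startswith stripped "#" then ""
    else if PySem.Str.isIn " #" stripped then
      PySem.Str.rstrip (((PySem.Str.splitMax? stripped " #" 1).getD []).getD 0 "")
    else stripped

-- _collect_requirement_block: returns (collected, remaining lines)
def collectBlock : List String → (List String × List String)
  | [] => ([], [])
  | raw :: rest =>
    let stripped := PySem.Str.strip raw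
    if stripped = "" then ([], rest)
    else if ¬(PySem.Str.startswith raw " " || PySem.Str.startswith raw "\t")
            ∧ ¬(PySem.Str.startswith stripped "-" || PySem.Str.startswith stripped "*")
            ∧ PySem.Str.isIn ":" stripped then ([], raw :: rest)
    else
      let r := normReq raw
      let p := collectBlock rest
      (if r = "" then p.1 else r :: p.1, p.2)

-- the inner fence loop of A: returns (collected, remaining lines)
def fenceLoop (inReq : Bool) : List String → (List String × List String)
  | [] => ([], [])
  | l :: rest =>
    if PySem.Str.startswith (PySem.Str.strip l) "```" then ([], rest)
    else
      let p := fenceLoop inReq rest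
      if inReq then
        let r := normReq l
        (if r = "" then p.1 else r :: p.1, p.2)
      else p

theorem collectBlock_len_le : ∀ (ls : List String), (collectBlock ls).2.length ≤ ls.length := by
  intro ls
  induction ls with
  | nil => simp [collectBlock]
  | cons raw rest ih =>
    simp only [collectBlock]
    split
    · simp
    · split
      · simp
      · simp only [List.length_cons]
        omega

theorem fenceLoop_len_le (inReq : Bool) : ∀ (ls : List String), (fenceLoop inReq ls).2.length ≤ ls.length := by
  intro ls
  induction ls with
  | nil => simp [fenceLoop]
  | cons l rest ih =>
    simp only [fenceLoop]
    split
    · simp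
    · simp only [List.length_cons]
      split
      · simp only []
        omega
      · omega

-- A's outer while loop
def loopA : List String → List String
  | [] => []
  | line :: rest =>
    let stripped := PySem.Str.strip line
    let lower := PySem.Str.lower stripped
    if PySem.Str.startswith stripped "```" then
      let lang := PySem.Str.lower (PySem.Str.strip (PySem.Str.slice stripped (some 3) none))
      let p := fenceLoop (PySem.Str.startswith lang "requirements") rest
      p.1 ++ loopA p.2
    else if PySem.Str.startswith lower "requirements:" then
      let tail := PySem.Str.strip (((PySem.Str.splitMax? line ":" 1).getD []).getD 1 "")
      let hd := if tail ≠ "" then (let r := normReq tail; if r ≠ "" then [r] else []) else []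
      let p := collectBlock rest
      hd ++ p.1 ++ loopA p.2
    else loopA rest
termination_by ls => ls.length
decreasing_by
  · simp only [List.length_cons]
    exact Nat.lt_succ_of_le (fenceLoop_len_le _ _)
  · simp only [List.length_cons]
    exact Nat.lt_succ_of_le (collectBlock_len_le _)
  · simp

def parse_requirements_from_docstring (docstring : Option String) : List String :=
  match docstring with
  | none => []
  | some s => if s = "" then [] else PySem.List.dedup (loopA (PySem.Str.splitlines s))

-- ===== PORT B =====

inductive PState where
  | normal | fenceReq | fenceOther | block
deriving DecidableEq, Repr

def pstateRank : PState → Nat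
  | .block => 1
  | _ => 0

-- B's single state-machine loop; returns the requirement lines emitted from this point on
def loopB : List String → PState → List String
  | [], _ => []
  | line :: rest, st =>
    let stripped := PySem.Str.strip line
    match st with
    | .fenceReq =>
      if PySem.Str.startswith stripped "```" then loopB rest .normal
      else
        let r := normReq line
        if r = "" then loopB rest .fenceReq else r :: loopB rest .fenceReq
    | .fenceOther =>
      if PySem.Str.startswith stripped "```" then loopB rest .normal
      else loopB rest .fenceOther
    | .block =>
      if stripped = "" then loopB rest .normal
      else if ¬(PySem.Str.startswith line " " || PySem.Str.startswith line "\t")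
              ∧ ¬(PySem.Str.startswith stripped "-" || PySem.Str.startswith stripped "*")
              ∧ PySem.Str.isIn ":" stripped then
        loopB (line :: rest) .normal  -- leave the block WITHOUT consuming the line
      else
        let r := normReq line
        if r = "" then loopB rest .block else r :: loopB rest .block
    | .normal =>
      if PySem.Str.startswith stripped "```" then
        let lang := PySem.Str.lower (PySem.Str.strip (PySem.Str.slice stripped (some 3) none))
        loopB rest (if PySem.Str.startswith lang "requirements" then .fenceReq else .fenceOther)
      else if PySem.Str.startswith (PySem.Str.lower stripped) "requirements:" then
        let tail := PySem.Str.strip (((PySem.Str.splitMax? line ":" 1).getD []).getD 1 "")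
        let hd := if tail ≠ "" then (let r := normReq tail; if r ≠ "" then [r] else []) else []
        hd ++ loopB rest .block
      else loopB rest .normal
termination_by ls st => (ls.length, pstateRank st)
decreasing_by all_goals simp [pstateRank]; omega

-- B's explicit seen-set dedup loop
def dedupB (rs : List String) : List String :=
  (rs.foldl (fun (p : List String × PySem.Set String) r =>
    if r ∈ p.2 then p else (p.1 ++ [r], p.2.add r)) ([], PySem.Set.ofList [])).1

def parse_requirements_from_docstring_alt (docstring : Option String) : List String :=
  match docstring with
  | none => []
  | some s => if s = "" then [] else dedupB (loopB (PySem.Str.splitlines s) .normal)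

-- ===== PRECONDITION & SPEC =====
def Spec_parse_requirements_from_docstring (docstring : Option String) (out : List String) : Prop := out = parse_requirements_from_docstring_alt docstring
instance (docstring : Option String) (out : List String) : Decidable (Spec_parse_requirements_from_docstring docstring out) := by unfold Spec_parse_requirements_from_docstring; infer_instance

-- ===== CLAIM (what is proved, stated in full; the proofs are below) =====
def Claim_equal_parse_requirements_from_docstring : Prop := ∀ (docstring : Option String), Dom_parse_requirements_from_docstring docstring → Spec_parse_requirements_from_docstring docstring (parse_requirements_from_docstring docstring)

-- ===== LEMMAS AND PROOFS =====

theorem loopB_fenceReq (ls : List String) :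
    loopB ls .fenceReq = (fenceLoop true ls).1 ++ loopB (fenceLoop true ls).2 .normal := by
  induction ls with
  | nil => simp [loopB, fenceLoop]
  | cons l rest ih =>
    simp only [loopB, fenceLoop]
    by_cases h : PySem.Str.startswith (PySem.Str.strip l) "```" = true
    · rw [if_pos h, if_pos h]
      simp
    · rw [if_neg h, if_neg h]
      rw [ih]
      split <;> simp

theorem loopB_fenceOther (ls : List String) :
    loopB ls .fenceOther = (fenceLoop false ls).1 ++ loopB (fenceLoop false ls).2 .normal := by
  induction ls with
  | nil => simp [loopB, fenceLoop]
  | cons l rest ih =>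
    simp only [loopB, fenceLoop]
    by_cases h : PySem.Str.startswith (PySem.Str.strip l) "```" = true
    · rw [if_pos h, if_pos h]
      simp
    · rw [if_neg h, if_neg h]
      exact ih

theorem loopB_block (ls : List String) :
    loopB ls .block = (collectBlock ls).1 ++ loopB (collectBlock ls).2 .normal := by
  induction ls with
  | nil => simp [loopB, collectBlock]
  | cons l rest ih =>
    simp only [loopB, collectBlock]
    by_cases h1 : PySem.Str.strip l = ""
    · rw [if_pos h1, if_pos h1]
      simp
    · rw [if_neg h1, if_neg h1]
      by_cases h2 : ¬(PySem.Str.startswith l " " || PySem.Str.startswith l "\t") = true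
            ∧ ¬(PySem.Str.startswith (PySem.Str.strip l) "-" || PySem.Str.startswith (PySem.Str.strip l) "*") = true
            ∧ PySem.Str.isIn ":" (PySem.Str.strip l) = true
      · rw [if_pos h2, if_pos h2]
        conv_rhs => rw [loopB]
        simp
      · rw [if_neg h2, if_neg h2]
        rw [ih]
        split <;> simp

theorem loopA_eq_loopB (ls : List String) : loopA ls = loopB ls .normal := by
  induction ls using loopA.induct
  case case1 => simp [loopA, loopB]
  case case2 raw rest stripped h lang p ih =>
    simp only [stripped, lang, p] at h ih
    conv_lhs => simp only [loopA]
    conv_rhs => simp only [loopB]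
    rw [if_pos h, if_pos h]
    by_cases hr : PySem.Str.startswith (PySem.Str.lower (PySem.Str.strip (PySem.Str.slice (PySem.Str.strip raw) (some 3) none))) "requirements" = true
    · rw [hr] at ih ⊢
      rw [if_pos rfl, loopB_fenceReq, ih]
    · rw [Bool.not_eq_true] at hr
      rw [hr] at ih ⊢
      rw [if_neg (by simp), loopB_fenceOther, ih]
  case case3 raw rest stripped lower h1 h2 p ih =>
    simp only [stripped, lower, p] at h1 h2 ih
    conv_lhs => simp only [loopA]
    conv_rhs => simp only [loopB]
    rw [if_neg h1, if_neg h1, if_pos h2, if_pos h2]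
    rw [loopB_block, ih, List.append_assoc]
  case case4 raw rest stripped lower h1 h2 ih =>
    simp only [stripped, lower] at h1 h2
    conv_lhs => simp only [loopA]
    conv_rhs => simp only [loopB]
    rw [if_neg h1, if_neg h1, if_neg h2, if_neg h2]
    exact ih

theorem dedupB_aux (rs : List String) : ∀ (s : PySem.Set String),
    (rs.foldl (fun (p : List String × PySem.Set String) r =>
      if r ∈ p.2 then p else (p.1 ++ [r], p.2.add r)) (s, s)).1 = rs.foldl PySem.Set.add s := by
  induction rs with
  | nil => intro s; rfl
  | cons r rest ih =>
    intro s
    simp only [List.foldl_cons]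
    by_cases h : r ∈ s
    · have hadd : PySem.Set.add s r = s := by
        simp [PySem.Set.add, PySem.Set.contains, h]
      rw [if_pos h, hadd]
      exact ih s
    · have hadd : PySem.Set.add s r = s ++ [r] := by
        simp [PySem.Set.add, PySem.Set.contains, h]
      rw [if_neg h, hadd]
      exact ih (s ++ [r])

theorem dedupB_eq (rs : List String) : dedupB rs = PySem.List.dedup rs := by
  unfold dedupB
  rw [PySem.List.dedup_eq_ofList, PySem.Set.ofList_eq_foldl]
  exact dedupB_aux rs []

-- ===== VERDICT (by name: the statement is the Claim_ definition above) =====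
theorem parse_requirements_from_docstring_spec : Claim_equal_parse_requirements_from_docstring := by
  intro doc _
  unfold Spec_parse_requirements_from_docstring
  unfold parse_requirements_from_docstring parse_requirements_from_docstring_alt
  match doc with
  | none => rfl
  | some s =>
    split
    · rfl
    · rw [loopA_eq_loopB, dedupB_eq]
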